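-- pv_equiv track=rewrite | github.com/edwardmpearce/adventofcode | 2015/Day11/sol.py | longest_increasing_straight
-- ===== SOURCE A (Python) =====
-- def longest_increasing_straight(s: str) -> int:
--     """Find the length of the longest substring of incrementally increasing characters (by unicode code point value) within the input string"""
--     if len(s) == 0:
--         return 0
--     longest_straight, current_straight = 1, 1
--     for c1, c2 in zip(s, s[1:]):
--         if ord(c2) - ord(c1) == 1:
--             # Increasing straight continues
--             current_straight += 1
--         else:
--             # Current straight has ended. Update longest straight if needed and start a new straight.
--             longest_straight, current_straight = max(longest_straight, current_straight), 1
--     # Check whether last straight in the string is the longest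
--     return max(longest_straight, current_straight)
-- ===== SOURCE B (Python) =====
-- def longest_increasing_straight(s: str) -> int:
--     """Decompose: adjacency signal -> run-length encoding -> max True-run + 1."""
--     if not s:
--         return 0
--     steps = [ord(c2) - ord(c1) == 1 for c1, c2 in zip(s, s[1:])]
--     runs = []
--     for x in steps:
--         if runs and runs[-1][0] == x:
--             runs[-1] = (x, runs[-1][1] + 1)
--         else:
--             runs.append((x, 1))
--     return max((n for k, n in runs if k), default=0) + 1
-- ===== Notes on version B (the rewrite author's own statement) =====
-- stated objective: alternative
-- what changed: Replaces A's inline longest/current counter bookkeeping by a staged pipeline: build the boolean adjacency signal, run-length-encode it into groups, and return the longest True-run length plus one.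
import Mathlib
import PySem

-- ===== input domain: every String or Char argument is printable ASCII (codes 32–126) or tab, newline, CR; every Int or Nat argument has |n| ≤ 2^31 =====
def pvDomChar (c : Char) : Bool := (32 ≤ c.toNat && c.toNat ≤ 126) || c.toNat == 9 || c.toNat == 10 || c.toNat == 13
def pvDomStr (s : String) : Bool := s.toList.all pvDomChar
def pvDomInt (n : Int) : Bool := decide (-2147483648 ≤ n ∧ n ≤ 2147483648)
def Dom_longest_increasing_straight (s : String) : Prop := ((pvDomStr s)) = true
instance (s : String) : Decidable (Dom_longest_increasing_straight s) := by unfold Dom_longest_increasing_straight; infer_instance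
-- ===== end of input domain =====

-- B replaces A's inline longest/current counter bookkeeping by a staged pipeline
-- (adjacency signal -> run-length encoding -> max True-run + 1); alternative decomposition, same cost.


-- ===== PORT A =====
-- loop body of A: state (longest_straight, current_straight), one char pair
def pvStepA (st : Int × Int) (p : Char × Char) : Int × Int :=
  if ((p.2.toNat : Int) - (p.1.toNat : Int)) = 1 then (st.1, st.2 + 1)
  else (max st.1 st.2, 1)

def longest_increasing_straight (s : String) : Int :=
  if s.toList.length = 0 then 0
  else
    let cs := s.toList
    let st := (cs.zip (PySem.List.slice cs (some 1) none)).foldl pvStepA (1, 1)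
    max st.1 st.2

-- ===== PORT B =====
-- loop body of B's run-length encoding: merge into the last run or append a new run
def pvStepB (runs : List (Bool × Int)) (x : Bool) : List (Bool × Int) :=
  match runs.getLast? with
  | some (k, m) => if k == x then runs.dropLast ++ [(x, m + 1)] else runs ++ [(x, 1)]
  | none => runs ++ [(x, 1)]

-- max((n for k, n in runs if k), default=0)
def pvMaxTrue (runs : List (Bool × Int)) : Int :=
  runs.foldl (fun m kn => if kn.1 then max m kn.2 else m) 0

def longest_increasing_straight_alt (s : String) : Int :=
  if s.toList = [] then 0
  else
    let cs := s.toList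
    let steps := (cs.zip (PySem.List.slice cs (some 1) none)).map
      (fun p => decide (((p.2.toNat : Int) - (p.1.toNat : Int)) = 1))
    let runs := steps.foldl pvStepB []
    pvMaxTrue runs + 1

-- ===== PRECONDITION & SPEC =====
def Spec_longest_increasing_straight (s : String) (out : Int) : Prop := out = longest_increasing_straight_alt s
instance (s : String) (out : Int) : Decidable (Spec_longest_increasing_straight s out) := by unfold Spec_longest_increasing_straight; infer_instance

-- ===== CLAIM (what is proved, stated in full; the proofs are below) =====
def Claim_equal_longest_increasing_straight : Prop := ∀ (s : String), Dom_longest_increasing_straight s → Spec_longest_increasing_straight s (longest_increasing_straight s)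

-- ===== LEMMAS AND PROOFS =====

-- A's loop, rephrased on the boolean adjacency signal
def pvFAB : List Bool → Int × Int → Int × Int
  | [], st => st
  | true :: t, st => pvFAB t (st.1, st.2 + 1)
  | false :: t, st => pvFAB t (max st.1 st.2, 1)

-- length of the leading run of `true`s
def pvLead : List Bool → Nat
  | [] => 0
  | true :: bs => pvLead bs + 1
  | false :: _ => 0

-- suffix after the first `false`
def pvAfterF : List Bool → List Bool
  | [] => []
  | true :: bs => pvAfterF bs
  | false :: bs => bs

theorem pvAfterF_len (bs : List Bool) : (pvAfterF bs).length ≤ bs.length := by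
  induction bs with
  | nil => simp [pvAfterF]
  | cons b t ih => cases b <;> simp [pvAfterF] <;> omega

-- longest run of `true`s
def pvM : List Bool → Nat
  | [] => 0
  | false :: bs => pvM bs
  | true :: bs => max (pvLead bs + 1) (pvM (pvAfterF bs))
termination_by bs => bs.length
decreasing_by
  · simp only [List.length_cons]; omega
  · simp only [List.length_cons]; have := pvAfterF_len bs; omega

theorem pvM_eq_max (bs : List Bool) : pvM bs = max (pvLead bs) (pvM (pvAfterF bs)) := by
  cases bs with
  | nil => simp [pvM, pvLead, pvAfterF]
  | cons b t => cases b <;> simp [pvM, pvLead, pvAfterF]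

theorem foldA_eq_pvFAB (ps : List (Char × Char)) (st : Int × Int) :
    ps.foldl pvStepA st =
      pvFAB (ps.map fun p => decide (((p.2.toNat : Int) - (p.1.toNat : Int)) = 1)) st := by
  induction ps generalizing st with
  | nil => simp [pvFAB]
  | cons p t ih =>
    by_cases h : ((p.2.toNat : Int) - (p.1.toNat : Int)) = 1 <;>
      simp [List.foldl_cons, pvStepA, h, pvFAB, ih]

theorem pvFAB_char (bs : List Bool) (L c : Int) (hc : 1 ≤ c) :
    max (pvFAB bs (L, c)).1 (pvFAB bs (L, c)).2 =
      max (max L (c + (pvLead bs : Int))) ((pvM (pvAfterF bs) : Int) + 1) := by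
  induction bs generalizing L c with
  | nil => simp [pvFAB, pvLead, pvAfterF, pvM]; omega
  | cons b t ih =>
    cases b with
    | true =>
      simp only [pvFAB, pvLead, pvAfterF]
      rw [ih L (c + 1) (by omega)]
      push_cast; omega
    | false =>
      simp only [pvFAB, pvLead, pvAfterF]
      rw [ih (max L c) 1 (by omega), pvM_eq_max t]
      push_cast; omega

theorem pvMaxTrue_le_foldl (rs : List (Bool × Int)) (a : Int) :
    a ≤ rs.foldl (fun m kn => if kn.1 then max m kn.2 else m) a := by
  induction rs generalizing a with
  | nil => simp
  | cons kn t ih =>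
    refine le_trans ?_ (ih _)
    by_cases h : kn.1 = true <;> simp [h] <;> omega

theorem pvMaxTrue_nonneg (rs : List (Bool × Int)) : 0 ≤ pvMaxTrue rs :=
  pvMaxTrue_le_foldl rs 0

theorem pvMaxTrue_concat (rs : List (Bool × Int)) (k : Bool) (m : Int) :
    pvMaxTrue (rs ++ [(k, m)]) = if k then max (pvMaxTrue rs) m else pvMaxTrue rs := by
  simp [pvMaxTrue, List.foldl_append]

theorem foldB_char (bs : List Bool) (rs : List (Bool × Int)) (k : Bool) (m : Int)
    (hm : 1 ≤ m) :
    pvMaxTrue (bs.foldl pvStepB (rs ++ [(k, m)])) =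
      max (pvMaxTrue rs)
        (if k then max (m + (pvLead bs : Int)) ((pvM (pvAfterF bs) : Int)) else (pvM bs : Int)) := by
  induction bs generalizing rs k m with
  | nil =>
    have h0 := pvMaxTrue_nonneg rs
    cases k <;> simp [pvMaxTrue_concat, pvLead, pvAfterF, pvM] <;> omega
  | cons x t ih =>
    have hstep : pvStepB (rs ++ [(k, m)]) x =
        if k == x then rs ++ [(x, m + 1)] else (rs ++ [(k, m)]) ++ [(x, 1)] := by
      simp [pvStepB]
    rw [List.foldl_cons, hstep]
    by_cases hkx : k = x
    · subst hkx
      simp only [BEq.rfl, if_true]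
      rw [ih rs k (m + 1) (by omega)]
      cases k <;> simp [pvLead, pvAfterF, pvM] <;> push_cast <;> omega
    · have : (k == x) = false := by simp [hkx]
      rw [this]
      simp only [Bool.false_eq_true, if_false]
      rw [ih (rs ++ [(k, m)]) x 1 (by omega), pvMaxTrue_concat]
      cases k <;> cases x <;> simp_all [pvLead, pvAfterF, pvM] <;>
        push_cast <;> omega

theorem main_eq (s : String) :
    longest_increasing_straight s = longest_increasing_straight_alt s := by
  unfold longest_increasing_straight longest_increasing_straight_alt
  by_cases hs : s.toList = []
  · simp [hs]
  · simp only [hs, if_false, List.length_eq_zero_iff, reduceIte]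
    set ps := s.toList.zip (PySem.List.slice s.toList (some 1) none) with hps
    rw [foldA_eq_pvFAB]
    set bs := ps.map fun p => decide (((p.2.toNat : Int) - (p.1.toNat : Int)) = 1) with hbs
    cases bs with
    | nil => simp [pvFAB, pvMaxTrue]
    | cons x t =>
      rw [pvFAB_char _ 1 1 (by omega)]
      have hfold : (x :: t).foldl pvStepB ([] : List (Bool × Int)) =
          t.foldl pvStepB ([] ++ [(x, 1)]) := by
        cases x <;> simp [pvStepB]
      rw [hfold, foldB_char t [] x 1 (by omega)]
      have h0 : pvMaxTrue [] = 0 := by simp [pvMaxTrue]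
      rw [h0]
      have hM := pvM_eq_max t
      cases x <;> simp [pvLead, pvAfterF, pvM] <;> push_cast <;> omega

-- ===== VERDICT (by name: the statement is the Claim_ definition above) =====
theorem longest_increasing_straight_spec : Claim_equal_longest_increasing_straight := by
  intro s _
  unfold Spec_longest_increasing_straight
  exact main_eq s
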